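-- pv_equiv track=rewrite | github.com/TProrochenko/ttcc | metrics.py | saved_keystrokes
-- ===== SOURCE A (Python) =====
-- def saved_keystrokes(gt: str, suggestion: str) -> int:
--     incr = 1
--     score = 0
--     if len(suggestion) > len(gt):
--         gt = list(gt) + [None] * (len(suggestion) - len(gt))
--
--     for c1, c2 in zip(gt, suggestion):
--         if c1 != c2 and incr > 0:
--             incr = -incr
--         score += incr
--
--     return score
-- ===== SOURCE B (Python) =====
-- def saved_keystrokes(gt: str, suggestion: str) -> int:
--     k = 0
--     for c1, c2 in zip(gt, suggestion):
--         if c1 != c2: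
--             break
--         k += 1
--     return 2 * k - len(suggestion)
-- ===== Notes on version B (the rewrite author's own statement) =====
-- stated objective: simpler
-- what changed: Replaces A's None-padding of gt and sign-flip accumulation over the whole zipped length by counting the common leading prefix k (breaking at the first mismatch) and returning the closed form 2*k - len(suggestion).
import Mathlib
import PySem

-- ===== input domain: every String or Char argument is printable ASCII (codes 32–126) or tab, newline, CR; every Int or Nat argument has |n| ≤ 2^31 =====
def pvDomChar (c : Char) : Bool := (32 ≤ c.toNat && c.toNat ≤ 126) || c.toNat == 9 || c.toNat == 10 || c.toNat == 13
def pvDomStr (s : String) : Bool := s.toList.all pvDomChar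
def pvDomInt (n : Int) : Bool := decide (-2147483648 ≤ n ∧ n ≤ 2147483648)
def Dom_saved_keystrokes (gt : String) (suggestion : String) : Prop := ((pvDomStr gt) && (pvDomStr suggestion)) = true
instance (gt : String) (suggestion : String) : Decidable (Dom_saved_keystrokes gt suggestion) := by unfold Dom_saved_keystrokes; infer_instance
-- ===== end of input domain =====

-- B replaces A's None-padding and sign-flip accumulation by a prefix count k and the closed form 2*k - len(suggestion) (objective: simpler).

-- ===== PORT A =====
-- Python's None-padded gt is modelled as List (Option Char): chars as `some`, None as `none`.
def pvStepA (st : Int × Int) (cc : Option Char × Char) : Int × Int :=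
  let incr := if cc.1 ≠ some cc.2 ∧ st.1 > 0 then -st.1 else st.1
  (incr, st.2 + incr)

def saved_keystrokes (gt : String) (suggestion : String) : Int :=
  let gtl : List (Option Char) :=
    if suggestion.toList.length > gt.toList.length then
      gt.toList.map some ++ List.replicate (suggestion.toList.length - gt.toList.length) none
    else gt.toList.map some
  ((List.zip gtl suggestion.toList).foldl pvStepA (1, 0)).2

-- ===== PORT B =====
-- the `for c1, c2 in zip: if c1 != c2: break; k += 1` loop of Source B
def pvPrefLen (g s : List Char) : Nat :=
  match g, s with
  | a :: g', b :: s' => if a = b then pvPrefLen g' s' + 1 else 0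
  | _, _ => 0

def saved_keystrokes_alt (gt : String) (suggestion : String) : Int :=
  2 * (pvPrefLen gt.toList suggestion.toList : Int) - (suggestion.toList.length : Int)

-- ===== PRECONDITION & SPEC =====
def Spec_saved_keystrokes (gt : String) (suggestion : String) (out : Int) : Prop := out = saved_keystrokes_alt gt suggestion
instance (gt : String) (suggestion : String) (out : Int) : Decidable (Spec_saved_keystrokes gt suggestion out) := by unfold Spec_saved_keystrokes; infer_instance

-- ===== CLAIM (what is proved, stated in full; the proofs are below) =====
def Claim_equal_saved_keystrokes : Prop := ∀ (gt : String) (suggestion : String), Dom_saved_keystrokes gt suggestion → Spec_saved_keystrokes gt suggestion (saved_keystrokes gt suggestion)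

-- ===== LEMMAS AND PROOFS =====

-- matching-prefix length of a zipped (Option Char × Char) list
def pvPrefLenP (l : List (Option Char × Char)) : Nat :=
  match l with
  | [] => 0
  | (a, b) :: t => if a = some b then pvPrefLenP t + 1 else 0

theorem pvFold_neg (l : List (Option Char × Char)) : ∀ s : Int,
    (l.foldl pvStepA (-1, s)).2 = s - l.length := by
  induction l with
  | nil => intro s; simp
  | cons cc t ih =>
      intro s
      have : pvStepA (-1, s) cc = (-1, s + -1) := by
        simp [pvStepA]
      simp only [List.foldl_cons, this, ih, List.length_cons]
      push_cast; ring

theorem pvFold_pos (l : List (Option Char × Char)) : ∀ s : Int,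
    (l.foldl pvStepA (1, s)).2 = s + 2 * (pvPrefLenP l : Int) - l.length := by
  induction l with
  | nil => intro s; simp [pvPrefLenP]
  | cons cc t ih =>
      intro s
      obtain ⟨a, b⟩ := cc
      by_cases h : a = some b
      · have hstep : pvStepA (1, s) (a, b) = (1, s + 1) := by
          simp [pvStepA, h]
        simp only [List.foldl_cons, hstep, ih, pvPrefLenP, if_pos h, List.length_cons]
        push_cast; ring
      · have hstep : pvStepA (1, s) (a, b) = (-1, s + -1) := by
          simp [pvStepA, h]
        simp only [List.foldl_cons, hstep, pvFold_neg, pvPrefLenP, if_neg h, List.length_cons]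
        push_cast; ring

theorem pvPrefLenP_zip (g : List Char) : ∀ (s : List Char) (r : List (Option Char)),
    (∀ x ∈ r, x = none) → pvPrefLenP (List.zip (g.map some ++ r) s) = pvPrefLen g s := by
  induction g with
  | nil =>
      intro s r hr
      cases s with
      | nil => simp [pvPrefLen, pvPrefLenP]
      | cons b s' =>
          cases r with
          | nil => simp [pvPrefLen, pvPrefLenP]
          | cons x r' =>
              have hx := hr x (by simp)
              subst hx
              simp [pvPrefLen, pvPrefLenP]
  | cons a g' ih =>
      intro s r hr
      cases s with
      | nil => simp [pvPrefLen, pvPrefLenP]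
      | cons b s' =>
          simp only [List.map_cons, List.cons_append, List.zip_cons_cons, pvPrefLenP, pvPrefLen,
            ih s' r hr]
          by_cases h : a = b <;> simp [h]

-- ===== VERDICT (by name: the statement is the Claim_ definition above) =====
theorem saved_keystrokes_spec : Claim_equal_saved_keystrokes := by
  intro gt suggestion _
  unfold Spec_saved_keystrokes saved_keystrokes saved_keystrokes_alt
  set g := gt.toList
  set s := suggestion.toList
  by_cases h : s.length > g.length
  · have hrep : ∀ x ∈ List.replicate (s.length - g.length) (none : Option Char), x = none := by
      intro x hx; exact List.eq_of_mem_replicate hx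
    have hlen : (List.zip (g.map some ++ List.replicate (s.length - g.length) none) s).length
        = s.length := by
      simp [List.length_zip]; omega
    simp only [if_pos h, pvFold_pos, pvPrefLenP_zip g s _ hrep, hlen]; ring
  · have hlen : (List.zip (g.map some) s).length = s.length := by
      simp [List.length_zip]; omega
    have hz : pvPrefLenP (List.zip (g.map some) s) = pvPrefLen g s := by
      simpa using pvPrefLenP_zip g s [] (by simp)
    simp only [if_neg h, pvFold_pos, hz, hlen]; ring
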